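-- pv_equiv track=rewrite | github.com/Helton-Pereira/trybe-exercicios | ciencia-da-computacao/algoritmos/dia-02-recursividade-e-estrategias-para-solucao-de-problemas/exercicios.py | biggest_number_aux
-- ===== SOURCE A (Python) =====
-- def biggest_number_aux(list, length):
--     if length == 1:
--         return list[0]
--     else:
--         biggest_number_rest_list = biggest_number_aux(list, length - 1)
--         if biggest_number_rest_list > list[length - 1]:
--             return biggest_number_rest_list
--         else:
--             return list[length-1]
-- ===== SOURCE B (Python) =====
-- def biggest_number_aux(list, length):
--     return max(list[i] for i in range(length))
-- ===== Notes on version B (the rewrite author's own statement) =====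
-- stated objective: idiomatic
-- what changed: Replaces the hand-written recursion unwinding list[:length-1] with the built-in max over a generator of the first length elements.
import Mathlib
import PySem

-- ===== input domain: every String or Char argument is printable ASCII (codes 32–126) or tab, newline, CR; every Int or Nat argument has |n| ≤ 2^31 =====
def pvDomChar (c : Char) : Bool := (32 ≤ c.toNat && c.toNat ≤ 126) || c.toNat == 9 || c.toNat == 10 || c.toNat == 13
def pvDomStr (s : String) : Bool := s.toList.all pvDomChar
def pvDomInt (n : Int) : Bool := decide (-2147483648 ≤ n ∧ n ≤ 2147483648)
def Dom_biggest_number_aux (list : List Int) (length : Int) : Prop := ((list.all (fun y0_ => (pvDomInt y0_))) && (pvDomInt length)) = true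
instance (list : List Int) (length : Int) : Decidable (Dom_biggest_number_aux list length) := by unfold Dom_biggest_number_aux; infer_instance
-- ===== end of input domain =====

-- B replaces A's hand-written recursion over the prefix with the built-in
-- max over a generator of the first `length` elements (idiomatic one-liner).

-- ===== PORT A =====
-- Literal port of A's recursion on `length`. For length ≤ 0 the Python recurses
-- forever (no base case is reached); the guard returning 0 there only makes the
-- Lean function total — such inputs are outside Pre_.
def biggest_number_aux (list : List Int) (length : Int) : Int :=
  if length = 1 then (PySem.List.pyGet? list 0).getD 0
  else if length ≤ 0 then 0  -- divergence guard, outside Pre_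
  else
    let biggest_number_rest_list := biggest_number_aux list (length - 1)
    if biggest_number_rest_list > (PySem.List.pyGet? list (length - 1)).getD 0 then
      biggest_number_rest_list
    else
      (PySem.List.pyGet? list (length - 1)).getD 0
termination_by length.toNat
decreasing_by omega

-- ===== PORT B =====
-- return max(list[i] for i in range(length))
def biggest_number_aux_alt (list : List Int) (length : Int) : Int :=
  (PySem.List.max?
    ((PySem.List.pyRange 0 length 1).map (fun i => (PySem.List.pyGet? list i).getD 0))
    (fun y => y)).getD 0

-- ===== PRECONDITION & SPEC =====
-- Pre_ excludes exactly the inputs where Python A raises: length ≤ 0 (infinite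
-- recursion, RecursionError) and length > len(list) (IndexError at list[length-1]).
def Pre_biggest_number_aux (list : List Int) (length : Int) : Prop :=
  1 ≤ length ∧ length ≤ (list.length : Int)
instance (list : List Int) (length : Int) : Decidable (Pre_biggest_number_aux list length) := by
  unfold Pre_biggest_number_aux; infer_instance
def pvWitness_biggest_number_aux : List Int × Int := ([3, -1, 7, 7, 2], 4)

def Spec_biggest_number_aux (list : List Int) (length : Int) (out : Int) : Prop :=
  out = biggest_number_aux_alt list length
instance (list : List Int) (length : Int) (out : Int) : Decidable (Spec_biggest_number_aux list length out) := by
  unfold Spec_biggest_number_aux; infer_instance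

-- ===== CLAIM (what is proved, stated in full; the proofs are below) =====
def Claim_equal_biggest_number_aux : Prop := ∀ (list : List Int) (length : Int), Dom_biggest_number_aux list length → Pre_biggest_number_aux list length → Spec_biggest_number_aux list length (biggest_number_aux list length)

-- ===== LEMMAS AND PROOFS =====

-- Python's max over the generated prefix is the running-max loop (max?_id_cons);
-- peeling the last index off range(length) gives exactly A's recursive step.
theorem alt_succ (list : List Int) (m : Int) (hm : 1 ≤ m) :
    biggest_number_aux_alt list (m + 1)
      = max (biggest_number_aux_alt list m) ((PySem.List.pyGet? list m).getD 0) := by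
  unfold biggest_number_aux_alt
  rw [PySem.List.pyRange_one_succ_right (by omega), List.map_append, List.map_singleton]
  obtain ⟨x, t, hxt⟩ :
      ∃ x t, (PySem.List.pyRange 0 m 1).map (fun i => (PySem.List.pyGet? list i).getD 0)
        = x :: t := by
    cases hcase : (PySem.List.pyRange 0 m 1).map (fun i => (PySem.List.pyGet? list i).getD 0) with
    | nil =>
      exfalso
      have hlen := congrArg List.length hcase
      simp [PySem.List.length_pyRange_one] at hlen
      omega
    | cons x t => exact ⟨x, t, rfl⟩
  rw [hxt, List.cons_append, PySem.List.max?_id_cons, PySem.List.max?_id_cons,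
    List.foldl_append]
  simp

-- A = B for every length ≥ 1 (no bound on the list is needed: both ports read
-- exactly the indices 0 .. length-1 through the same pyGet?/getD access).
theorem bna_eq_alt_of_pos (list : List Int) (length : Int) (h : 1 ≤ length) :
    biggest_number_aux list length = biggest_number_aux_alt list length := by
  obtain ⟨n, rfl⟩ : ∃ n : ℕ, length = (n : Int) := ⟨length.toNat, by omega⟩
  induction n with
  | zero => omega
  | succ m ih =>
    by_cases hm : 1 ≤ (m : Int)
    · rw [biggest_number_aux]
      push_cast
      rw [if_neg (by omega), if_neg (by omega),
        show (m : Int) + 1 - 1 = (m : Int) by ring, ih hm,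
        alt_succ list (m : Int) hm]
      split_ifs <;> omega
    · -- m = 0, so length = 1: base case
      have hm0 : m = 0 := by omega
      subst hm0
      rw [biggest_number_aux]
      norm_num
      unfold biggest_number_aux_alt
      rw [show (PySem.List.pyRange 0 1 1) = [0] from PySem.List.pyRange_one_singleton 0]
      rw [List.map_singleton, PySem.List.max?_id_cons]
      simp

-- ===== VERDICT (by name: the statement is the Claim_ definition above) =====
theorem biggest_number_aux_spec : Claim_equal_biggest_number_aux := by
  intro list length _ hpre
  unfold Spec_biggest_number_aux
  exact bna_eq_alt_of_pos list length hpre.1
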